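-- pv_equiv track=rewrite | github.com/jenlcmc/graphrag_tax | evaluation/datasets/sara_v3.py | _split_prolog_clauses
-- ===== SOURCE A (Python) =====
-- def _split_prolog_clauses(lines: list[str]) -> list[str]:
--     """Split Prolog lines into complete clauses ending in a period."""
--     clauses: list[str] = []
--     buffer: list[str] = []
--
--     for raw in lines:
--         line = raw.strip()
--         if not line:
--             continue
--
--         buffer.append(line)
--         if line.endswith("."):
--             clauses.append(" ".join(buffer))
--             buffer = []
--
--     if buffer:
--         clauses.append(" ".join(buffer))
--
--     return clauses
-- ===== SOURCE B (Python) =====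
-- def _split_prolog_clauses(lines: list[str]) -> list[str]:
--     """Split Prolog lines into complete clauses ending in a period."""
--     kept = [s for s in (raw.strip() for raw in lines) if s]
--     rev = []  # one list per clause, its lines collected back-to-front; clauses last-first
--     for head in reversed(kept):
--         if head.endswith(".") or not rev:
--             rev.append([head])
--         else:
--             rev[-1].append(head)
--     return [" ".join(reversed(group)) for group in reversed(rev)]
-- ===== Notes on version B (the rewrite author's own statement) =====
-- stated objective: alternative
-- what changed: Replaces A's forward scan with a mutable buffer flushed on each terminator line by a strip-and-filter pass followed by a backward pass that builds the clause list back-to-front, gluing each non-terminator line onto the front of the clause built after it, so no pending buffer or final flush exists.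
import Mathlib
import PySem

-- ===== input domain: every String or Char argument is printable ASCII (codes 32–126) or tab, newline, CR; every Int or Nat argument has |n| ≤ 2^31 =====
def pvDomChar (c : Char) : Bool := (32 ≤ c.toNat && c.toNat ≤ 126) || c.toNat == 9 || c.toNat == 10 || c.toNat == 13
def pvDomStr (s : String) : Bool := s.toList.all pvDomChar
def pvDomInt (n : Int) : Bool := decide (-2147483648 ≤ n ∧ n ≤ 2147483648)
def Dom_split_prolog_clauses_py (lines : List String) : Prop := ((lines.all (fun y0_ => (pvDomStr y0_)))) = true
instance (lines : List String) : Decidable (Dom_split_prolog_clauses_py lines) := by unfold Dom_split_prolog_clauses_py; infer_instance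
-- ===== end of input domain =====

-- B replaces A's forward buffer-and-flush scan by a strip/filter pass followed by a backward
-- pass that collects each clause's lines back-to-front and joins them at the end (objective: alternative).


-- ===== PORT A =====
-- one iteration of A's for-loop over (clauses, buffer)
def pvAStep (st : List String × List String) (raw : String) : List String × List String :=
  let line := PySem.Str.strip raw
  if line = "" then st
  else
    let buffer := st.2 ++ [line]
    if PySem.Str.endswith line "." then (st.1 ++ [PySem.Str.join " " buffer], [])
    else (st.1, buffer)

def split_prolog_clauses_py (lines : List String) : List String :=
  let st := lines.foldl pvAStep ([], [])
  if st.2 = [] then st.1 else st.1 ++ [PySem.Str.join " " st.2]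

-- ===== PORT B =====
-- one iteration of B's backward loop: rev holds one line-list per clause
-- (lines back-to-front), clauses last-first; rev[-1].append is a set of the last element
def pvBStep (rev : List (List String)) (head : String) : List (List String) :=
  if PySem.Str.endswith head "." || rev.isEmpty then rev ++ [[head]]
  else PySem.List.pySetD rev (-1) (PySem.List.pyGetD rev (-1) [] ++ [head])

def split_prolog_clauses_py_alt (lines : List String) : List String :=
  ((((lines.map PySem.Str.strip).filter (fun s => s ≠ "")).reverse.foldl pvBStep []).reverse).map
    (fun group => PySem.Str.join " " group.reverse)

-- ===== PRECONDITION & SPEC =====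
def Spec_split_prolog_clauses_py (lines : List String) (out : List String) : Prop := out = split_prolog_clauses_py_alt lines
instance (lines : List String) (out : List String) : Decidable (Spec_split_prolog_clauses_py lines out) := by unfold Spec_split_prolog_clauses_py; infer_instance

-- ===== CLAIM (what is proved, stated in full; the proofs are below) =====
def Claim_equal_split_prolog_clauses_py : Prop := ∀ (lines : List String), Dom_split_prolog_clauses_py lines → Spec_split_prolog_clauses_py lines (split_prolog_clauses_py lines)

-- ===== LEMMAS AND PROOFS =====

-- A's loop body on an already-stripped nonempty line
def pvStep (st : List String × List String) (line : String) : List String × List String :=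
  if PySem.Str.endswith line "." then (st.1 ++ [PySem.Str.join " " (st.2 ++ [line])], [])
  else (st.1, st.2 ++ [line])

-- A's epilogue (flush the remaining buffer)
def pvFinish (st : List String × List String) : List String :=
  if st.2 = [] then st.1 else st.1 ++ [PySem.Str.join " " st.2]

-- the joined clause list of the kept (stripped, nonempty) lines, as a right recursion
def pvClausesOf : List String → List String
  | [] => []
  | head :: tl =>
    let rest := pvClausesOf tl
    if PySem.Str.endswith head "." then head :: rest
    else
      match rest with
      | [] => [head]
      | c :: cs => PySem.Str.join " " [head, c] :: cs

-- the clause list as line-lists (clauses in order, lines in order), same right recursion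
def pvGroups : List String → List (List String)
  | [] => []
  | head :: tl =>
    if PySem.Str.endswith head "." then [head] :: pvGroups tl
    else
      match pvGroups tl with
      | [] => [[head]]
      | g :: gs => (head :: g) :: gs

-- how a pending buffer merges into the clauses of the remaining lines
def pvMergeB (buf : List String) (r : List String) : List String :=
  if buf = [] then r
  else
    match r with
    | [] => [PySem.Str.join " " buf]
    | c :: cs => PySem.Str.join " " [PySem.Str.join " " buf, c] :: cs

theorem pvAStep_eq (st : List String × List String) (raw : String) :
    pvAStep st raw = if PySem.Str.strip raw = "" then st else pvStep st (PySem.Str.strip raw) := rfl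

theorem pvCharsJoin_append_singleton (sep : List Char) (l : List (List Char)) (hl : l ≠ []) (s : List Char) :
    PySem.Chars.join sep (l ++ [s]) = PySem.Chars.join sep l ++ sep ++ s := by
  induction l with
  | nil => exact absurd rfl hl
  | cons x tl ih =>
    cases tl with
    | nil => simp [PySem.Chars.join_cons_cons, PySem.Chars.join_singleton]
    | cons y tl' =>
      simp only [List.cons_append, PySem.Chars.join_cons_cons]
      rw [← List.cons_append, ih (by simp)]
      simp [List.append_assoc]

theorem pvToList_inj {s t : String} (h : s.toList = t.toList) : s = t := by
  have h2 := congrArg String.ofList h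
  simpa using h2

theorem pvJoin_singleton (s : String) : PySem.Str.join " " [s] = s := by
  apply pvToList_inj
  simp [PySem.Str.toList_join, PySem.Chars.join_singleton]

theorem pvJoin_snoc (buf : List String) (hb : buf ≠ []) (s : String) :
    PySem.Str.join " " (buf ++ [s]) = PySem.Str.join " " [PySem.Str.join " " buf, s] := by
  apply pvToList_inj
  rw [PySem.Str.toList_join, List.map_append, List.map_singleton,
    pvCharsJoin_append_singleton _ _ (by simpa using hb)]
  simp [PySem.Str.toList_join, PySem.Chars.join_cons_cons, PySem.Chars.join_singleton]

theorem pvGlue_assoc (a s c : String) :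
    PySem.Str.join " " [PySem.Str.join " " [a, s], c]
      = PySem.Str.join " " [a, PySem.Str.join " " [s, c]] := by
  apply pvToList_inj
  simp [PySem.Str.toList_join, PySem.Chars.join_cons_cons, PySem.Chars.join_singleton]

theorem pvJoin_cons (h : String) (g : List String) (hg : g ≠ []) :
    PySem.Str.join " " (h :: g) = PySem.Str.join " " [h, PySem.Str.join " " g] := by
  rcases g with _ | ⟨c, g'⟩
  · exact absurd rfl hg
  · apply pvToList_inj
    simp [PySem.Str.toList_join, PySem.Chars.join_cons_cons, PySem.Chars.join_singleton,
      List.append_assoc]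

theorem pvSetLast {α : Type} (l : List α) (x v : α) :
    PySem.List.pySetD (l ++ [x]) (-1) v = l ++ [v] := by
  simp [PySem.List.pySetD, PySem.List.pySet?, PySem.List.pyIdx?]

-- every group produced by pvGroups is nonempty
theorem pvGroups_ne_nil (kept : List String) : ∀ g ∈ pvGroups kept, g ≠ [] := by
  induction kept with
  | nil => simp [pvGroups]
  | cons s tl ih =>
    intro g hg
    have hdot : (".".toList : List Char) = ['.'] := by decide
    by_cases he : PySem.Chars.endswith s.toList ['.'] = true
    · rcases (by simpa [pvGroups, PySem.Str.endswith_eq, hdot, he] using hg :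
          g = [s] ∨ g ∈ pvGroups tl) with h1 | h1
      · simp [h1]
      · exact ih g h1
    · rcases hr : pvGroups tl with _ | ⟨g0, gs⟩
      · simp [pvGroups, PySem.Str.endswith_eq, hdot, he, hr] at hg
        simp [hg]
      · rcases (by simpa [pvGroups, PySem.Str.endswith_eq, hdot, he, hr] using hg :
            g = s :: g0 ∨ g ∈ gs) with h1 | h1
        · simp [h1]
        · exact ih g (by simp [hr, h1])

-- joining each group gives the joined clause list
theorem pvClausesOf_eq_groups (kept : List String) :
    pvClausesOf kept = (pvGroups kept).map (PySem.Str.join " ") := by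
  induction kept with
  | nil => rfl
  | cons s tl ih =>
    have hdot : (".".toList : List Char) = ['.'] := by decide
    by_cases he : PySem.Chars.endswith s.toList ['.'] = true
    · simp [pvClausesOf, pvGroups, PySem.Str.endswith_eq, hdot, he, ih, pvJoin_singleton]
    · rcases hr : pvGroups tl with _ | ⟨g0, gs⟩
      · simp [pvClausesOf, pvGroups, PySem.Str.endswith_eq, hdot, he, hr, ih, pvJoin_singleton]
      · have hg0 : g0 ≠ [] := pvGroups_ne_nil tl g0 (by simp [hr])
        simp [pvClausesOf, pvGroups, PySem.Str.endswith_eq, hdot, he, hr, ih,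
          pvJoin_cons s g0 hg0]

-- B's backward loop computes the groups, last clause first, lines back-to-front
theorem pvRevFold (kept : List String) :
    kept.foldr (fun head rev => pvBStep rev head) []
      = ((pvGroups kept).map List.reverse).reverse := by
  induction kept with
  | nil => rfl
  | cons s tl ih =>
    rw [List.foldr_cons, ih]
    have hdot : (".".toList : List Char) = ['.'] := by decide
    by_cases he : PySem.Chars.endswith s.toList ['.'] = true
    · simp [pvBStep, pvGroups, PySem.Str.endswith_eq, hdot, he]
    · rcases hr : pvGroups tl with _ | ⟨g0, gs⟩
      · simp [pvBStep, pvGroups, PySem.Str.endswith_eq, hdot, he, hr]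
      · simp [pvBStep, pvGroups, PySem.Str.endswith_eq, hdot, he, hr,
          PySem.List.pyGetD_neg_one_append_singleton, pvSetLast]

-- B computes the joined clause list
theorem pvAlt_eq (lines : List String) :
    split_prolog_clauses_py_alt lines
      = pvClausesOf ((lines.map PySem.Str.strip).filter (fun s => s ≠ "")) := by
  unfold split_prolog_clauses_py_alt
  rw [List.foldl_reverse, pvRevFold, List.reverse_reverse, pvClausesOf_eq_groups]
  simp [List.map_map, Function.comp_def]

-- flushing after folding A's step over stripped lines = clauses so far ++ (buffer merged into the clauses)
theorem pvInvariant (kept : List String) :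
    ∀ (cl buf : List String),
      pvFinish (kept.foldl pvStep (cl, buf)) = cl ++ pvMergeB buf (pvClausesOf kept) := by
  induction kept with
  | nil =>
    intro cl buf
    by_cases hb : buf = [] <;> simp [pvFinish, pvMergeB, pvClausesOf, hb]
  | cons s tl ih =>
    intro cl buf
    have hdot : (".".toList : List Char) = ['.'] := by decide
    rw [List.foldl_cons]
    by_cases he : PySem.Chars.endswith s.toList ['.'] = true
    · rw [show pvStep (cl, buf) s = (cl ++ [PySem.Str.join " " (buf ++ [s])], []) by
        simp [pvStep, PySem.Str.endswith_eq, hdot, he]]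
      rw [ih]
      by_cases hb : buf = []
      · simp [pvMergeB, pvClausesOf, PySem.Str.endswith_eq, hdot, he, hb, pvJoin_singleton]
      · simp [pvMergeB, pvClausesOf, PySem.Str.endswith_eq, hdot, he, hb, pvJoin_snoc buf hb s]
    · rw [show pvStep (cl, buf) s = (cl, buf ++ [s]) by
        simp [pvStep, PySem.Str.endswith_eq, hdot, he]]
      rw [ih]
      rcases hr : pvClausesOf tl with _ | ⟨c, cs⟩
      · by_cases hb : buf = []
        · simp [pvMergeB, pvClausesOf, PySem.Str.endswith_eq, hdot, he, hb, hr, pvJoin_singleton]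
        · simp [pvMergeB, pvClausesOf, PySem.Str.endswith_eq, hdot, he, hb, hr, pvJoin_snoc buf hb s]
      · by_cases hb : buf = []
        · simp [pvMergeB, pvClausesOf, PySem.Str.endswith_eq, hdot, he, hb, hr, pvJoin_singleton]
        · simp [pvMergeB, pvClausesOf, PySem.Str.endswith_eq, hdot, he, hb, hr,
            pvJoin_snoc buf hb s, pvGlue_assoc]

-- folding A's raw step over the raw lines = folding the stripped step over the kept lines
theorem pvFold_strip (lines : List String) :
    ∀ (st : List String × List String),
      lines.foldl pvAStep st = ((lines.map PySem.Str.strip).filter (fun s => s ≠ "")).foldl pvStep st := by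
  induction lines with
  | nil => intro st; rfl
  | cons a tl ih =>
    intro st
    by_cases h : PySem.Str.strip a = "" <;>
      simp [pvAStep_eq, h, ih]

-- ===== VERDICT (by name: the statement is the Claim_ definition above) =====
theorem split_prolog_clauses_py_spec : Claim_equal_split_prolog_clauses_py := by
  intro lines _
  show split_prolog_clauses_py lines = split_prolog_clauses_py_alt lines
  have h1 : split_prolog_clauses_py lines = pvFinish (lines.foldl pvAStep ([], [])) := rfl
  rw [h1, pvFold_strip, pvInvariant, pvAlt_eq]
  simp [pvMergeB]
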